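-- pv_equiv track=rewrite | github.com/itsshivampal/Concept-Prerequiste-Learning | Proposed Method/Exp 2/content_processing.py | get_section_data
-- ===== SOURCE A (Python) =====
-- def get_section_data(book_data):
--     section_list = [book_data[i]["section"] for i in range(len(book_data))]
--     section_data = {}
--     for i in range(len(section_list)):
--         current_collection = [section_list[i]]
--         flag = 0
--         for j in range(i+1, len(section_list)):
--             x1 = len(section_list[i].split("."))
--             x2 = len(section_list[j].split("."))
--             if x2 > x1:
--                 current_collection.append(section_list[j])
--             else:
--                 section = section_list[i]
--                 section_data[section] = "|".join(current_collection)
--                 flag = 1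
--                 break
--         if flag == 0:
--             section = section_list[i]
--             section_data[section] = "|".join(current_collection)
--     return section_data
-- ===== SOURCE B (Python) =====
-- def get_section_data(book_data):
--     sections = [row["section"] for row in book_data]
--     n = len(sections)
--     depths = [len(s.split(".")) for s in sections]
--     # one monotonic-stack pass: ends[i] = index of first later section with depth <= depths[i], else n
--     ends = [n] * n
--     stack = []
--     for j in range(n):
--         while stack and depths[stack[-1]] >= depths[j]:
--             ends[stack.pop()] = j
--         stack.append(j)
--     section_data = {}
--     for i in range(n):
--         section_data[sections[i]] = "|".join(sections[i:ends[i]])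
--     return section_data
-- ===== Notes on version B (the rewrite author's own statement) =====
-- stated objective: faster
-- what changed: Depths are computed once and a single monotonic-stack pass precomputes every section's run boundary (first later section of equal-or-shallower depth), after which each dict value is one slice-and-join; A instead rescans forward from every position, re-splitting both strings at every comparison.
import Mathlib
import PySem

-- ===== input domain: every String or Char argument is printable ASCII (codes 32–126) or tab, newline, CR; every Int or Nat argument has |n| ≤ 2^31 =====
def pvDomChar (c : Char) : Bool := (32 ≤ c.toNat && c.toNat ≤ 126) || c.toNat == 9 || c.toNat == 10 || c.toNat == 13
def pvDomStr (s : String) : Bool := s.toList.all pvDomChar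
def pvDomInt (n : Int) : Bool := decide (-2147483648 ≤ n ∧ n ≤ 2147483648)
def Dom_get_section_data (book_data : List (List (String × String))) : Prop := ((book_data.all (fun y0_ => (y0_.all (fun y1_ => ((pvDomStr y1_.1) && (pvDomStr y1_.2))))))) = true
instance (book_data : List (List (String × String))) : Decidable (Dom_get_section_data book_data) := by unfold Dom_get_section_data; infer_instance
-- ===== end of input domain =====

-- B replaces A's per-section forward rescan (which re-splits strings at every comparison) by depths
-- computed once and a single monotonic-stack pass that finds every section's run boundary (a
-- constant-factor saving). A mutates nothing; equivalence is about the returned dict items.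

-- ===== PORT A =====
-- section_list = [book_data[i]["section"] ...]; a missing "section" key raises KeyError (excluded by Pre_),
-- so the total stand-in `.getD ""` is never reached on admitted inputs.
def pvSections (book_data : List (List (String × String))) : List String :=
  book_data.map (fun row => ((PySem.Dict.mk row).get? "section").getD "")

-- len(s.split(".")): sep "." ≠ "" so PySem.Str.split? is always `some`
def pvDepth (s : String) : Nat := ((PySem.Str.split? s ".").getD []).length

-- inner `for j in range(i+1, n)` loop with its break, over the suffix after position i
def innerA (si : String) : List String → List String → List String
  | [], acc => acc
  | sj :: t, acc =>
      let x1 := pvDepth si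
      let x2 := pvDepth sj
      if x2 > x1 then innerA si t (acc ++ [sj]) else acc

-- outer `for i in range(n)` loop: at each i the dict gets "|".join(current_collection)
def outerA : List String → PySem.Dict String String → PySem.Dict String String
  | [], d => d
  | s :: t, d => outerA t (d.insert s (PySem.Str.join "|" (innerA s t [s])))

def get_section_data (book_data : List (List (String × String))) : List (String × String) :=
  (outerA (pvSections book_data) PySem.Dict.empty).items

-- ===== PORT B =====
-- `while stack and depths[stack[-1]] >= depths[j]: ends[stack.pop()] = j`
def popLoopB (depths : List Nat) (j : Nat) : List Nat → List Nat → List Nat × List Nat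
  | ends, [] => (ends, [])
  | ends, k :: st =>
      if depths.getD k 0 ≥ depths.getD j 0 then popLoopB depths j (ends.set k j) st
      else (ends, k :: st)

-- the stack pass over j in range(n), starting from ends = [n]*n, stack = []
def buildEndsB (depths : List Nat) : List Nat :=
  ((List.range depths.length).foldl
    (fun p j => let q := popLoopB depths j p.1 p.2; (q.1, j :: q.2))
    (List.replicate depths.length depths.length, [])).1

-- slice sections[i:ends[i]] has 0 ≤ i ≤ ends[i], so it is exactly drop-then-take
def get_section_data_alt (book_data : List (List (String × String))) : List (String × String) :=
  let sections := pvSections book_data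
  let depths := sections.map pvDepth
  let ends := buildEndsB depths
  ((List.range sections.length).foldl
    (fun d i => d.insert (sections.getD i "")
        (PySem.Str.join "|" ((sections.drop i).take (ends.getD i 0 - i))))
    PySem.Dict.empty).items

-- ===== PRECONDITION & SPEC =====
-- Pre_ excludes exactly the inputs where Python A raises KeyError: a row without the key "section".
def Pre_get_section_data (book_data : List (List (String × String))) : Prop :=
  ∀ row ∈ book_data, (PySem.Dict.mk row).contains "section" = true
instance (book_data : List (List (String × String))) : Decidable (Pre_get_section_data book_data) := by
  unfold Pre_get_section_data; infer_instance

def pvWitness_get_section_data : (List (List (String × String))) :=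
  [[("section", "1")], [("section", "1.1")], [("section", "2")]]

def Spec_get_section_data (book_data : List (List (String × String))) (out : List (String × String)) : Prop := out = get_section_data_alt book_data
instance (book_data : List (List (String × String))) (out : List (String × String)) : Decidable (Spec_get_section_data book_data out) := by unfold Spec_get_section_data; infer_instance

-- ===== CLAIM (what is proved, stated in full; the proofs are below) =====
def Claim_equal_get_section_data : Prop := ∀ (book_data : List (List (String × String))), Dom_get_section_data book_data → Pre_get_section_data book_data → Spec_get_section_data book_data (get_section_data book_data)

-- ===== LEMMAS AND PROOFS =====

-- length of the run of strictly deeper sections following position i (on the depth list ds)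
def pvRunLen (ds : List Nat) (i : Nat) : Nat :=
  ((ds.drop (i+1)).takeWhile (fun x => decide (ds.getD i 0 < x))).length

-- "no section in (k, j) closes the run opened at k"
def pvOpen (ds : List Nat) (k j : Nat) : Prop :=
  ∀ l, k < l → l < j → ds.getD k 0 < ds.getD l 0

-- invariant of the stack pass after processing j sections, state p = (ends, stack)
def pvInv (ds : List Nat) (j : Nat) (p : List Nat × List Nat) : Prop :=
  p.1.length = ds.length ∧
  (∀ k ∈ p.2, k < j) ∧
  p.2.Pairwise (fun a b => b < a) ∧
  p.2.Pairwise (fun a b => ds.getD b 0 < ds.getD a 0) ∧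
  (∀ k, k < j → (k ∈ p.2 ↔ pvOpen ds k j)) ∧
  (∀ k, k < j → k ∉ p.2 → ∃ m, k < m ∧ m < j ∧ pvOpen ds k m ∧
      ds.getD m 0 ≤ ds.getD k 0 ∧ p.1.getD k 0 = m) ∧
  (∀ k ∈ p.2, p.1.getD k 0 = ds.length) ∧
  (∀ k, j ≤ k → k < ds.length → p.1.getD k 0 = ds.length)

lemma pv_getD_eq_getElem {α : Type} (l : List α) (d : α) (i : Nat) (h : i < l.length) :
    l.getD i d = l[i] := by
  simp [List.getD_eq_getElem?_getD, h]

lemma pv_take_length_takeWhile {α : Type} (p : α → Bool) (l : List α) :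
    l.take (l.takeWhile p).length = l.takeWhile p := by
  induction l with
  | nil => rfl
  | cons a t ih => by_cases h : p a <;> simp [h, ih]

lemma pv_takeWhile_length {α : Type} (p : α → Bool) :
    ∀ (l : List α) (m : Nat), (hm : m ≤ l.length) →
    (∀ i, (h : i < m) → p (l[i]'(lt_of_lt_of_le h hm)) = true) →
    (∀ (h : m < l.length), p (l[m]'h) = false) →
    (l.takeWhile p).length = m := by
  intro l
  induction l with
  | nil => intro m hm _ _; simp at hm ⊢; omega
  | cons a t ih =>
    intro m hm h1 h2
    cases m with
    | zero =>
      have hpa : p a = false := by simpa using h2 (by simp)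
      simp [hpa]
    | succ m' =>
      have ha : p a = true := h1 0 (Nat.succ_pos _)
      simp only [List.takeWhile_cons, ha, if_true, List.length_cons]
      rw [ih m' (by simpa using hm) (fun i h => h1 (i+1) (by omega)) (fun h => h2 (by simpa using h))]

lemma pv_runlen_eq (ds : List Nat) (k m : Nat) (hk : k < m) (hm : m ≤ ds.length)
    (hopen : pvOpen ds k m)
    (hstop : m = ds.length ∨ (m < ds.length ∧ ds.getD m 0 ≤ ds.getD k 0)) :
    k + 1 + pvRunLen ds k = m := by
  have hdlen : (ds.drop (k+1)).length = ds.length - (k+1) := by simp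
  have hlen : ((ds.drop (k+1)).takeWhile (fun x => decide (ds.getD k 0 < x))).length = m - (k+1) := by
    apply pv_takeWhile_length
    · intro i hi
      have hbound : k + 1 + i < ds.length := by omega
      have he : (ds.drop (k+1))[i]'(by omega) = ds[k+1+i]'hbound := List.getElem_drop
      rw [he]
      have := hopen (k+1+i) (by omega) (by omega)
      rw [pv_getD_eq_getElem ds 0 (k+1+i) hbound] at this
      simpa using this
    · intro h
      have hmlt : m < ds.length := by
        rcases hstop with h' | h'
        · omega
        · exact h'.1
      rcases hstop with h' | h'
      · omega
      · have he : (ds.drop (k+1))[m-(k+1)]'h = ds[k+1+(m-(k+1))]'(by omega) := List.getElem_drop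
        rw [he]
        have hidx : k+1+(m-(k+1)) = m := by omega
        have := h'.2
        rw [pv_getD_eq_getElem ds 0 m hmlt] at this
        simp only [decide_eq_false_iff_not, not_lt]
        calc ds[k+1+(m-(k+1))]'(by omega) = ds[m]'hmlt := by congr 1
          _ ≤ ds.getD k 0 := this
    · exact (by omega : m - (k+1) ≤ (ds.drop (k+1)).length)
  unfold pvRunLen
  omega

lemma pv_popLoop_spec (ds : List Nat) (j : Nat) :
    ∀ (stack ends : List Nat), stack.Pairwise (fun a b => b < a) →
    (popLoopB ds j ends stack).2 = stack.dropWhile (fun k => decide (ds.getD j 0 ≤ ds.getD k 0)) ∧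
    (popLoopB ds j ends stack).1.length = ends.length ∧
    (∀ k, k ∉ stack.takeWhile (fun k => decide (ds.getD j 0 ≤ ds.getD k 0)) →
        (popLoopB ds j ends stack).1.getD k 0 = ends.getD k 0) ∧
    (∀ k ∈ stack.takeWhile (fun k => decide (ds.getD j 0 ≤ ds.getD k 0)), k < ends.length →
        (popLoopB ds j ends stack).1.getD k 0 = j) := by
  intro stack
  induction stack with
  | nil => intro ends _; simp [popLoopB]
  | cons a st ih =>
    intro ends hp
    by_cases h : ds.getD j 0 ≤ ds.getD a 0
    · have hrec := ih (ends.set a j) (List.pairwise_cons.mp hp).2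
      have hna : a ∉ st := fun hmem => absurd ((List.pairwise_cons.mp hp).1 a hmem) (lt_irrefl a)
      simp only [popLoopB, ge_iff_le, if_pos h]
      rw [List.takeWhile_cons_of_pos (by simpa using h),
          List.dropWhile_cons_of_pos (by simpa using h)]
      refine ⟨hrec.1, by rw [hrec.2.1]; simp, ?_, ?_⟩
      · intro k hk
        have hka : k ≠ a := fun he => hk (he ▸ List.mem_cons_self)
        have hktw : k ∉ st.takeWhile (fun k => decide (ds.getD j 0 ≤ ds.getD k 0)) :=
          fun hm => hk (List.mem_cons_of_mem _ hm)
        rw [hrec.2.2.1 k hktw]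
        simp [List.getD_eq_getElem?_getD, List.getElem?_set_ne (fun he => hka he.symm)]
      · intro k hk hklen
        rcases List.mem_cons.mp hk with rfl | hk'
        · have hktw : k ∉ st.takeWhile (fun k => decide (ds.getD j 0 ≤ ds.getD k 0)) :=
            fun hm => hna ((List.takeWhile_sublist _).subset hm)
          rw [hrec.2.2.1 k hktw]
          simp [List.getD_eq_getElem?_getD, List.getElem?_set_self hklen]
        · exact hrec.2.2.2 k hk' (by simpa using hklen)
    · simp only [popLoopB, ge_iff_le, if_neg h]
      rw [List.takeWhile_cons_of_neg (by simpa using h),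
          List.dropWhile_cons_of_neg (by simpa using h)]
      simp

lemma pv_mem_dropWhile_lt (ds : List Nat) (j : Nat) :
    ∀ (l : List Nat), l.Pairwise (fun a b => ds.getD b 0 < ds.getD a 0) →
    ∀ k ∈ l.dropWhile (fun k => decide (ds.getD j 0 ≤ ds.getD k 0)),
      ds.getD k 0 < ds.getD j 0 := by
  intro l
  induction l with
  | nil => simp
  | cons a t ih =>
    intro hp k hk
    by_cases h : ds.getD j 0 ≤ ds.getD a 0
    · rw [List.dropWhile_cons_of_pos (by simpa using h)] at hk
      exact ih (List.pairwise_cons.mp hp).2 k hk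
    · rw [List.dropWhile_cons_of_neg (by simpa using h)] at hk
      rcases List.mem_cons.mp hk with rfl | hk'
      · omega
      · have := (List.pairwise_cons.mp hp).1 k hk'
        omega

lemma pv_inv_step (ds : List Nat) (j : Nat) (p : List Nat × List Nat)
    (hinv : pvInv ds j p) (hj : j < ds.length) :
    pvInv ds (j+1) (let q := popLoopB ds j p.1 p.2; (q.1, j :: q.2)) := by
  obtain ⟨hlen, hlt, hpidx, hpdep, hmem, hclosed, hstackn, hrest⟩ := hinv
  have spec := pv_popLoop_spec ds j p.2 p.1 hpidx
  obtain ⟨hq2, hq1len, hunch, hset⟩ := spec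
  set pred := fun k => decide (ds.getD j 0 ≤ ds.getD k 0) with hpred
  set tw := p.2.takeWhile pred with htw
  set dw := p.2.dropWhile pred with hdw
  have hsplit : tw ++ dw = p.2 := List.takeWhile_append_dropWhile
  have htwsub : ∀ k ∈ tw, k ∈ p.2 := fun k hk => (List.takeWhile_sublist _).subset hk
  have hdwsub : ∀ k ∈ dw, k ∈ p.2 := fun k hk => (List.dropWhile_sublist _).subset hk
  have hnodup : p.2.Nodup := hpidx.imp (fun h => ne_of_gt h)
  have hdisj : ∀ k ∈ dw, k ∉ tw := by
    have : (tw ++ dw).Nodup := by rw [hsplit]; exact hnodup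
    intro k hkdw hktw
    exact (List.disjoint_of_nodup_append this) hktw hkdw
  have hdwlt : ∀ k ∈ dw, ds.getD k 0 < ds.getD j 0 := pv_mem_dropWhile_lt ds j p.2 hpdep
  have htwge : ∀ k ∈ tw, ds.getD j 0 ≤ ds.getD k 0 := by
    intro k hk
    have := List.mem_takeWhile_imp hk
    simpa [hpred] using this
  have hjtw : j ∉ tw := fun hm => absurd (hlt j (htwsub j hm)) (lt_irrefl j)
  have hmemsplit : ∀ k ∈ p.2, k ∈ tw ∨ k ∈ dw := by
    intro k hk
    rw [← hsplit] at hk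
    exact List.mem_append.mp hk
  show pvInv ds (j+1) ((popLoopB ds j p.1 p.2).1, j :: (popLoopB ds j p.1 p.2).2)
  refine ⟨?_, ?_, ?_, ?_, ?_, ?_, ?_, ?_⟩
  · rw [hq1len]; exact hlen
  · intro k hk
    rcases List.mem_cons.mp hk with rfl | hk'
    · omega
    · rw [hq2] at hk'
      exact Nat.lt_succ_of_lt (hlt k (hdwsub k hk'))
  · rw [hq2]
    exact List.pairwise_cons.mpr ⟨fun b hb => hlt b (hdwsub b hb),
      hpidx.sublist (List.dropWhile_sublist _)⟩
  · rw [hq2]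
    exact List.pairwise_cons.mpr ⟨fun b hb => hdwlt b hb,
      hpdep.sublist (List.dropWhile_sublist _)⟩
  · intro k hk
    rw [hq2]
    constructor
    · intro hkmem
      rcases List.mem_cons.mp hkmem with rfl | hk'
      · intro l h1 h2; omega
      · have hkj : k < j := hlt k (hdwsub k hk')
        have hO : pvOpen ds k j := (hmem k hkj).mp (hdwsub k hk')
        intro l h1 h2
        rcases Nat.lt_or_ge l j with hl | hl
        · exact hO l h1 hl
        · have : l = j := by omega
          subst this
          exact hdwlt k hk'
    · intro hO
      rcases Nat.lt_or_ge k j with hkj | hkj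
      · have hkS : k ∈ p.2 := (hmem k hkj).mpr (fun l h1 h2 => hO l h1 (by omega))
        rcases hmemsplit k hkS with hktw | hkdw
        · exfalso
          have := hO j hkj (by omega)
          have := htwge k hktw
          omega
        · exact List.mem_cons_of_mem _ hkdw
      · have : k = j := by omega
        subst this
        exact List.mem_cons_self
  · intro k hk hnm
    rw [hq2] at hnm
    have hkj : k ≠ j := fun he => hnm (he ▸ List.mem_cons_self)
    have hklt : k < j := by omega
    by_cases hkS : k ∈ p.2
    · rcases hmemsplit k hkS with hktw | hkdw
      · refine ⟨j, hklt, by omega, (hmem k hklt).mp hkS, htwge k hktw, ?_⟩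
        exact hset k hktw (by rw [hlen]; omega)
      · exact absurd (List.mem_cons_of_mem _ hkdw) hnm
    · obtain ⟨m, h1, h2, h3, h4, h5⟩ := hclosed k hklt hkS
      refine ⟨m, h1, by omega, h3, h4, ?_⟩
      rw [hunch k (fun hm => hkS (htwsub k hm))]
      exact h5
  · intro k hk
    rcases List.mem_cons.mp hk with rfl | hk'
    · rw [hunch k hjtw]
      exact hrest k (le_refl _) hj
    · rw [hq2] at hk'
      rw [hunch k (hdisj k hk')]
      exact hstackn k (hdwsub k hk')
  · intro k hk1 hk2
    have hktw : k ∉ tw := fun hm => absurd (hlt k (htwsub k hm)) (by omega)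
    rw [hunch k hktw]
    exact hrest k (by omega) hk2

lemma pv_inv_fold (ds : List Nat) :
    ∀ j, j ≤ ds.length →
    pvInv ds j ((List.range j).foldl
      (fun p j => let q := popLoopB ds j p.1 p.2; (q.1, j :: q.2))
      (List.replicate ds.length ds.length, [])) := by
  intro j
  induction j with
  | zero =>
    intro _
    refine ⟨by simp, by simp, by simp, by simp, by omega, by omega, by simp, ?_⟩
    intro k _ hk
    simp [List.getD_eq_getElem?_getD, hk]
  | succ j ih =>
    intro h
    rw [List.range_succ, List.foldl_append, List.foldl_cons, List.foldl_nil]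
    exact pv_inv_step ds j _ (ih (by omega)) (by omega)

lemma pv_buildEnds_eq (ds : List Nat) (i : Nat) (hi : i < ds.length) :
    (buildEndsB ds).getD i 0 = i + 1 + pvRunLen ds i := by
  have hinv := pv_inv_fold ds ds.length (le_refl _)
  obtain ⟨hlen, hlt, hpidx, hpdep, hmem, hclosed, hstackn, hrest⟩ := hinv
  unfold buildEndsB
  by_cases hs : i ∈ ((List.range ds.length).foldl
      (fun p j => let q := popLoopB ds j p.1 p.2; (q.1, j :: q.2))
      (List.replicate ds.length ds.length, [])).2
  · rw [hstackn i hs]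
    exact (pv_runlen_eq ds i ds.length hi (le_refl _) ((hmem i hi).mp hs) (Or.inl rfl)).symm
  · obtain ⟨m, h1, h2, h3, h4, h5⟩ := hclosed i hi hs
    rw [h5]
    exact (pv_runlen_eq ds i m h1 (by omega) h3 (Or.inr ⟨h2, h4⟩)).symm

lemma pv_innerA_eq (si : String) :
    ∀ (t acc : List String),
      innerA si t acc = acc ++ t.takeWhile (fun s => decide (pvDepth si < pvDepth s)) := by
  intro t
  induction t with
  | nil => intro acc; simp [innerA]
  | cons sj t ih =>
    intro acc
    simp only [innerA]
    by_cases h : pvDepth si < pvDepth sj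
    · simp [h, ih]
    · simp [h]

lemma pv_outerA_eq :
    ∀ (L : List String) (d : PySem.Dict String String),
      outerA L d = (List.range L.length).foldl
        (fun d i => d.insert (L.getD i "")
          (PySem.Str.join "|" (L.getD i "" ::
            (L.drop (i+1)).takeWhile (fun s => decide (pvDepth (L.getD i "") < pvDepth s))))) d := by
  intro L
  induction L with
  | nil => intro d; simp [outerA]
  | cons s t ih =>
    intro d
    simp only [outerA]
    rw [ih]
    rw [show (s :: t).length = t.length + 1 from rfl, List.range_succ_eq_map]
    simp only [List.foldl_cons, List.foldl_map]
    congr 1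
    rw [pv_innerA_eq]
    simp

lemma pv_slice_eq (L : List String) (i : Nat) (hi : i < L.length) :
    (L.drop i).take ((buildEndsB (L.map pvDepth)).getD i 0 - i)
      = L.getD i "" :: (L.drop (i+1)).takeWhile (fun s => decide (pvDepth (L.getD i "") < pvDepth s)) := by
  have hmlen : (L.map pvDepth).length = L.length := by simp
  rw [pv_buildEnds_eq _ i (by omega)]
  have hsub : i + 1 + pvRunLen (L.map pvDepth) i - i = pvRunLen (L.map pvDepth) i + 1 := by omega
  rw [hsub, List.drop_eq_getElem_cons hi, List.take_succ_cons]
  have hgd : L.getD i "" = L[i] := pv_getD_eq_getElem L "" i hi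
  have hd0 : (L.map pvDepth).getD i 0 = pvDepth L[i] := by
    rw [pv_getD_eq_getElem _ 0 i (by omega)]
    simp
  have hrun : pvRunLen (L.map pvDepth) i
      = ((L.drop (i+1)).takeWhile (fun s => decide (pvDepth L[i] < pvDepth s))).length := by
    unfold pvRunLen
    rw [← List.map_drop, List.takeWhile_map, List.length_map, hd0]
    rfl
  rw [hgd, hrun, pv_take_length_takeWhile]

-- ===== VERDICT (by name: the statement is the Claim_ definition above) =====
theorem get_section_data_spec : Claim_equal_get_section_data := by
  intro bd _ _
  unfold Spec_get_section_data get_section_data get_section_data_alt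
  rw [pv_outerA_eq]
  congr 1
  apply PySem.List.foldl_congr_mem
  intro acc i hi
  rw [List.mem_range] at hi
  rw [pv_slice_eq _ _ hi]
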